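-- pv_equiv track=rewrite | github.com/chalos18/COSC-Studies | COSC262/final exam revision/final_exam_2023.py | dumbo_func_better
-- ===== SOURCE A (Python) =====
-- def dumbo_func_better(data, index=0):
--     """Takes a list of numbers and does weird stuff with it"""
--     if index >= len(data):
--         return 0
--     else:
--         if (data[index] // 100) % 3 != 0:
--             return 1 + dumbo_func_better(data, index + 1)
--         else:
--             return dumbo_func_better(data, index + 1)
-- ===== SOURCE B (Python) =====
-- def dumbo_func_better(data, index=0):
--     """Takes a list of numbers and does weird stuff with it"""
--     count = 0
--     for i in range(index, len(data)):
--         if (data[i] // 100) % 3 != 0: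
--             count += 1
--     return count
-- ===== Notes on version B (the rewrite author's own statement) =====
-- stated objective: simpler
-- what changed: Replaces A's recursion over a growing index with a single explicit loop over range(index, len(data)) that increments a counter; no recursion, constant stack.
import Mathlib
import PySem

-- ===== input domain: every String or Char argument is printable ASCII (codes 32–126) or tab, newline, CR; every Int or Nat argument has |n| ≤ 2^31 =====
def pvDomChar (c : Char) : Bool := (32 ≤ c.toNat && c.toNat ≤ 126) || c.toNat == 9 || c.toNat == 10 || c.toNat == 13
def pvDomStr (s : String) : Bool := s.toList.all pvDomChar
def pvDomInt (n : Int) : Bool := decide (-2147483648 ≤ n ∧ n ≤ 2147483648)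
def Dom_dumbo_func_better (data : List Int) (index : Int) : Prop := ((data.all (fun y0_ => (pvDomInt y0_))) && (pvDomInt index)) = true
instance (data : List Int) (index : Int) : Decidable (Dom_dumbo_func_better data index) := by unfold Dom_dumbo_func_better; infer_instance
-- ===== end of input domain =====

-- B replaces A's recursion with a single explicit counting loop over range(index, len(data)): simpler, no recursion.

-- ===== PORT A =====
-- literal port of A's recursion; data[index] is in range whenever Pre_ holds, .getD 0 is never reached there
def dumbo_func_better (data : List Int) (index : Int) : Int :=
  if _h : (data.length : Int) ≤ index then 0
  else
    if PySem.Int.mod (PySem.Int.floordiv ((PySem.List.pyGet? data index).getD 0) 100) 3 ≠ 0 then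
      1 + dumbo_func_better data (index + 1)
    else
      dumbo_func_better data (index + 1)
termination_by ((data.length : Int) - index).toNat
decreasing_by all_goals omega

-- ===== PORT B =====
-- literal port of B's loop: counter accumulated over range(index, len(data))
def dumbo_func_better_alt (data : List Int) (index : Int) : Int :=
  (PySem.List.pyRange index (data.length : Int) 1).foldl
    (fun count i =>
      if PySem.Int.mod (PySem.Int.floordiv ((PySem.List.pyGet? data i).getD 0) 100) 3 ≠ 0 then
        count + 1
      else
        count) 0

-- ===== PRECONDITION & SPEC =====
-- Pre_ excludes exactly the inputs index < -len(data), on which A (and B alike) raises IndexError at data[index]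
def Pre_dumbo_func_better (data : List Int) (index : Int) : Prop := -(data.length : Int) ≤ index
instance (data : List Int) (index : Int) : Decidable (Pre_dumbo_func_better data index) := by unfold Pre_dumbo_func_better; infer_instance
def pvWitness_dumbo_func_better : List Int × Int := ([100, 250, -42], 0)
def Spec_dumbo_func_better (data : List Int) (index : Int) (out : Int) : Prop := out = dumbo_func_better_alt data index
instance (data : List Int) (index : Int) (out : Int) : Decidable (Spec_dumbo_func_better data index out) := by unfold Spec_dumbo_func_better; infer_instance

-- ===== CLAIM (what is proved, stated in full; the proofs are below) =====
def Claim_equal_dumbo_func_better : Prop := ∀ (data : List Int) (index : Int), Dom_dumbo_func_better data index → Pre_dumbo_func_better data index → Spec_dumbo_func_better data index (dumbo_func_better data index)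

-- ===== LEMMAS AND PROOFS =====

-- the counting step of B's loop
def pvStep (data : List Int) : Int → Int → Int :=
  fun count i =>
    if PySem.Int.mod (PySem.Int.floordiv ((PySem.List.pyGet? data i).getD 0) 100) 3 ≠ 0 then
      count + 1
    else
      count

theorem pvFoldl_shift (data : List Int) (l : List Int) (c : Int) :
    l.foldl (pvStep data) c = c + l.foldl (pvStep data) 0 := by
  induction l generalizing c with
  | nil => simp
  | cons x xs ih =>
    simp only [List.foldl_cons]
    rw [ih (pvStep data c x), ih (pvStep data 0 x)]
    simp only [pvStep]
    split_ifs <;> ring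

theorem pvMain (data : List Int) (index : Int) :
    dumbo_func_better data index =
      (PySem.List.pyRange index (data.length : Int) 1).foldl (pvStep data) 0 := by
  by_cases h : (data.length : Int) ≤ index
  · rw [dumbo_func_better, dif_pos h, PySem.List.pyRange_one_eq_nil h]
    simp
  · have hlt : index < (data.length : Int) := lt_of_not_ge h
    rw [dumbo_func_better, dif_neg h, PySem.List.pyRange_one_cons hlt]
    rw [List.foldl_cons, pvFoldl_shift]
    rw [pvMain data (index + 1)]
    simp only [pvStep]
    split_ifs <;> ring
termination_by ((data.length : Int) - index).toNat
decreasing_by all_goals omega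

-- ===== VERDICT (by name: the statement is the Claim_ definition above) =====
theorem dumbo_func_better_spec : Claim_equal_dumbo_func_better := by
  intro data index _ _
  unfold Spec_dumbo_func_better dumbo_func_better_alt
  rw [pvMain]
  rfl
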